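-- pv_equiv track=rewrite | github.com/dhar174/tiny_village | tiny_output_interpreter.py | parse_creative_action
-- ===== SOURCE A (Python) =====
-- def parse_creative_action(action_name: str, parameters: dict) -> dict:
--     """Parse and validate creative action parameters"""
--     validated_params = parameters.copy()
--
--     # Handle hobby parameters
--     if "hobby" in action_name.lower():
--         hobby_keys = ["hobby", "hobby_type", "activity", "type"]
--         for key in hobby_keys:
--             if key in parameters:
--                 validated_params["hobby_type"] = parameters[key]
--                 break
--         else:
--             validated_params["hobby_type"] = "reading"  # Default hobby
--
--     # Handle crafting parameters
--     if "craft" in action_name.lower():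
--         item_keys = ["item", "item_type", "object", "thing", "product"]
--         for key in item_keys:
--             if key in parameters:
--                 validated_params["item_type"] = parameters[key]
--                 break
--
--     # Handle research parameters
--     if "research" in action_name.lower():
--         topic_keys = ["topic", "subject", "area", "field", "technology"]
--         for key in topic_keys:
--             if key in parameters:
--                 validated_params["topic"] = parameters[key]
--                 break
--
--     return validated_params
-- ===== SOURCE B (Python) =====
-- # alias -> (rule index, priority rank); rule 0 = hobby, 1 = craft, 2 = research
-- _ALIAS = {
--     "hobby": (0, 0), "hobby_type": (0, 1), "activity": (0, 2), "type": (0, 3),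
--     "item": (1, 0), "item_type": (1, 1), "object": (1, 2), "thing": (1, 3), "product": (1, 4),
--     "topic": (2, 0), "subject": (2, 1), "area": (2, 2), "field": (2, 3), "technology": (2, 4),
-- }
--
--
-- def parse_creative_action(action_name: str, parameters: dict) -> dict:
--     """Parse and validate creative action parameters.
--
--     Single pass over the parameters with an inverted alias index: for each
--     rule keep the (rank, value) with the smallest rank seen, then apply the
--     active rules.
--     """
--     best = [None, None, None]  # per rule: (rank, value) with the lowest rank
--     for key, value in parameters.items():
--         hit = _ALIAS.get(key)
--         if hit is not None:
--             i, rank = hit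
--             if best[i] is None or rank < best[i][0]:
--                 best[i] = (rank, value)
--
--     validated = parameters.copy()
--     name = action_name.lower()
--     if "hobby" in name:
--         validated["hobby_type"] = best[0][1] if best[0] is not None else "reading"
--     if "craft" in name and best[1] is not None:
--         validated["item_type"] = best[1][1]
--     if "research" in name and best[2] is not None:
--         validated["topic"] = best[2][1]
--     return validated
-- ===== Notes on version B (the rewrite author's own statement) =====
-- stated objective: alternative
-- what changed: Inverts the traversal: instead of A's three per-rule priority scans over candidate key lists querying the dict, B makes a single pass over the parameters items with a flat inverted alias index (alias -> rule, rank), keeping per rule the value of smallest rank, then applies the active rules.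
import Mathlib
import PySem

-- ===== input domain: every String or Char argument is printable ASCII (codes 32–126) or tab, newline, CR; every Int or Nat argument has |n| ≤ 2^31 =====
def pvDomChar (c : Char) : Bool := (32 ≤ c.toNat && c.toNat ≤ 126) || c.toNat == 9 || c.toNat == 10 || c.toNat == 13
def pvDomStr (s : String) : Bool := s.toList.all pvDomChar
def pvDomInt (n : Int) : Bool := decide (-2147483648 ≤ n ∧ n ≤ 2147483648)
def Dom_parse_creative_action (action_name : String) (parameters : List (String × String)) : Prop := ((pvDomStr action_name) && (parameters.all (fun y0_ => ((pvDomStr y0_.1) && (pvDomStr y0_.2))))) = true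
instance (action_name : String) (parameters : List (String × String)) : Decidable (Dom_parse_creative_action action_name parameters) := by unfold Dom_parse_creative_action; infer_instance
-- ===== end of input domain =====

-- B inverts A's traversal (one pass over the parameters with an inverted alias index instead of
-- three per-rule candidate-key scans); return-value equivalence only (neither mutates its input).

-- ===== PORT A =====
-- A's 'for key in keys: if key in parameters: … break' loop, as structural recursion.
def pvFindKeyA (d : PySem.Dict String String) : List String → Option String
  | [] => none
  | k :: ks =>
    match d.get? k with
    | some v => some v
    | none => pvFindKeyA d ks

def parse_creative_action (action_name : String) (parameters : List (String × String)) : List (String × String) :=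
  let params := PySem.Dict.ofList parameters
  let validated := params
  let validated :=
    if PySem.Str.isIn "hobby" (PySem.Str.lower action_name) then
      match pvFindKeyA params ["hobby", "hobby_type", "activity", "type"] with
      | some v => validated.insert "hobby_type" v
      | none => validated.insert "hobby_type" "reading"
    else validated
  let validated :=
    if PySem.Str.isIn "craft" (PySem.Str.lower action_name) then
      match pvFindKeyA params ["item", "item_type", "object", "thing", "product"] with
      | some v => validated.insert "item_type" v
      | none => validated
    else validated
  let validated :=
    if PySem.Str.isIn "research" (PySem.Str.lower action_name) then
      match pvFindKeyA params ["topic", "subject", "area", "field", "technology"] with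
      | some v => validated.insert "topic" v
      | none => validated
    else validated
  validated.items

-- ===== PORT B =====
-- Source B's _ALIAS: alias -> (rule index, priority rank); rule 0 = hobby, 1 = craft, 2 = research.
def pvAliasList : List (String × Nat × Nat) :=
  [("hobby", 0, 0), ("hobby_type", 0, 1), ("activity", 0, 2), ("type", 0, 3),
   ("item", 1, 0), ("item_type", 1, 1), ("object", 1, 2), ("thing", 1, 3), ("product", 1, 4),
   ("topic", 2, 0), ("subject", 2, 1), ("area", 2, 2), ("field", 2, 3), ("technology", 2, 4)]

-- 'if best[i] is None or rank < best[i][0]: best[i] = (rank, value)'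
def pvUpd (r : Nat) (v : String) : Option (Nat × String) → Option (Nat × String)
  | none => some (r, v)
  | some (r0, v0) => if r < r0 then some (r, v) else some (r0, v0)

-- one iteration of Source B's 'for key, value in parameters.items(): …' loop
def pvBestStep (best : Option (Nat × String) × Option (Nat × String) × Option (Nat × String))
    (kv : String × String) :
    Option (Nat × String) × Option (Nat × String) × Option (Nat × String) :=
  match pvAliasList.lookup kv.1 with
  | none => best
  | some (i, r) =>
    match i with
    | 0 => (pvUpd r kv.2 best.1, best.2.1, best.2.2)
    | 1 => (best.1, pvUpd r kv.2 best.2.1, best.2.2)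
    | _ => (best.1, best.2.1, pvUpd r kv.2 best.2.2)

def parse_creative_action_alt (action_name : String) (parameters : List (String × String)) : List (String × String) :=
  let params := PySem.Dict.ofList parameters
  let best := params.items.foldl pvBestStep (none, none, none)
  let validated := params
  let name := PySem.Str.lower action_name
  let validated :=
    if PySem.Str.isIn "hobby" name then
      validated.insert "hobby_type" (match best.1 with | some p => p.2 | none => "reading")
    else validated
  let validated :=
    if PySem.Str.isIn "craft" name then
      match best.2.1 with | some p => validated.insert "item_type" p.2 | none => validated
    else validated
  let validated :=
    if PySem.Str.isIn "research" name then
      match best.2.2 with | some p => validated.insert "topic" p.2 | none => validated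
    else validated
  validated.items

-- ===== PRECONDITION & SPEC =====
def Spec_parse_creative_action (action_name : String) (parameters : List (String × String)) (out : List (String × String)) : Prop := out = parse_creative_action_alt action_name parameters
instance (action_name : String) (parameters : List (String × String)) (out : List (String × String)) : Decidable (Spec_parse_creative_action action_name parameters out) := by unfold Spec_parse_creative_action; infer_instance

-- ===== CLAIM (what is proved, stated in full; the proofs are below) =====
def Claim_equal_parse_creative_action : Prop := ∀ (action_name : String) (parameters : List (String × String)), Dom_parse_creative_action action_name parameters → Spec_parse_creative_action action_name parameters (parse_creative_action action_name parameters)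

-- ===== LEMMAS AND PROOFS =====

-- first value in l (an items list) under key k: Dict.get? seen on the items list
def pvLookup (l : List (String × String)) (k : String) : Option String :=
  (l.find? (fun p => p.1 == k)).map (·.2)

theorem pvLookup_items (d : PySem.Dict String String) (k : String) :
    pvLookup d.items k = d.get? k := rfl

-- A's scan, phrased over an items list
def pvFirstVal (l : List (String × String)) : List String → Option String
  | [] => none
  | k :: ks =>
    match pvLookup l k with
    | some v => some v
    | none => pvFirstVal l ks

theorem pvFindKeyA_eq_firstVal (d : PySem.Dict String String) (ks : List String) :
    pvFindKeyA d ks = pvFirstVal d.items ks := by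
  induction ks with
  | nil => rfl
  | cons k ks ih => simp only [pvFindKeyA, pvFirstVal, pvLookup_items, ih]

-- first index of k in ks (Source B's rank of an alias within one rule's candidate list)
def pvIdxIn : List String → String → Option Nat
  | [], _ => none
  | k0 :: ks, k => if k == k0 then some 0 else (pvIdxIn ks k).map (· + 1)

-- per-rule rank functions read off the flat alias map
def pvRank0 (k : String) : Option Nat :=
  match pvAliasList.lookup k with | some (0, r) => some r | _ => none
def pvRank1 (k : String) : Option Nat :=
  match pvAliasList.lookup k with | some (1, r) => some r | _ => none
def pvRank2 (k : String) : Option Nat :=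
  match pvAliasList.lookup k with | some (_+2, r) => some r | _ => none

-- the per-rule projection of pvBestStep
def pvStepFor (rk : String → Option Nat) (b : Option (Nat × String)) (kv : String × String) :
    Option (Nat × String) :=
  match rk kv.1 with
  | none => b
  | some r => pvUpd r kv.2 b

theorem pvBestStep_split (l : List (String × String))
    (b0 b1 b2 : Option (Nat × String)) :
    l.foldl pvBestStep (b0, b1, b2) =
      (l.foldl (pvStepFor pvRank0) b0, l.foldl (pvStepFor pvRank1) b1,
       l.foldl (pvStepFor pvRank2) b2) := by
  induction l generalizing b0 b1 b2 with
  | nil => rfl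
  | cons kv l ih =>
    simp only [List.foldl_cons]
    rw [show pvBestStep (b0, b1, b2) kv =
          (pvStepFor pvRank0 b0 kv, pvStepFor pvRank1 b1 kv, pvStepFor pvRank2 b2 kv) from ?_,
        ih]
    simp only [pvBestStep, pvStepFor, pvRank0, pvRank1, pvRank2]
    rcases h : pvAliasList.lookup kv.1 with _ | ⟨i, r⟩
    · rfl
    · match i with
      | 0 => rfl
      | 1 => rfl
      | n + 2 => rfl

-- the rank functions are the first-index functions of A's three candidate lists
theorem pvRank0_eq (k : String) :
    pvRank0 k = pvIdxIn ["hobby", "hobby_type", "activity", "type"] k := by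
  rcases eq_or_ne k "hobby" with rfl | h1; · decide
  rcases eq_or_ne k "hobby_type" with rfl | h2; · decide
  rcases eq_or_ne k "activity" with rfl | h3; · decide
  rcases eq_or_ne k "type" with rfl | h4; · decide
  rcases eq_or_ne k "item" with rfl | h5; · decide
  rcases eq_or_ne k "item_type" with rfl | h6; · decide
  rcases eq_or_ne k "object" with rfl | h7; · decide
  rcases eq_or_ne k "thing" with rfl | h8; · decide
  rcases eq_or_ne k "product" with rfl | h9; · decide
  rcases eq_or_ne k "topic" with rfl | h10; · decide
  rcases eq_or_ne k "subject" with rfl | h11; · decide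
  rcases eq_or_ne k "area" with rfl | h12; · decide
  rcases eq_or_ne k "field" with rfl | h13; · decide
  rcases eq_or_ne k "technology" with rfl | h14; · decide
  have e : ∀ s : String, k ≠ s → (k == s) = false := fun s hs => beq_eq_false_iff_ne.mpr hs
  simp [pvRank0, pvAliasList, List.lookup, pvIdxIn, e _ h1, e _ h2, e _ h3, e _ h4, e _ h5,
    e _ h6, e _ h7, e _ h8, e _ h9, e _ h10, e _ h11, e _ h12, e _ h13, e _ h14]

theorem pvRank1_eq (k : String) :
    pvRank1 k = pvIdxIn ["item", "item_type", "object", "thing", "product"] k := by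
  rcases eq_or_ne k "hobby" with rfl | h1; · decide
  rcases eq_or_ne k "hobby_type" with rfl | h2; · decide
  rcases eq_or_ne k "activity" with rfl | h3; · decide
  rcases eq_or_ne k "type" with rfl | h4; · decide
  rcases eq_or_ne k "item" with rfl | h5; · decide
  rcases eq_or_ne k "item_type" with rfl | h6; · decide
  rcases eq_or_ne k "object" with rfl | h7; · decide
  rcases eq_or_ne k "thing" with rfl | h8; · decide
  rcases eq_or_ne k "product" with rfl | h9; · decide
  rcases eq_or_ne k "topic" with rfl | h10; · decide
  rcases eq_or_ne k "subject" with rfl | h11; · decide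
  rcases eq_or_ne k "area" with rfl | h12; · decide
  rcases eq_or_ne k "field" with rfl | h13; · decide
  rcases eq_or_ne k "technology" with rfl | h14; · decide
  have e : ∀ s : String, k ≠ s → (k == s) = false := fun s hs => beq_eq_false_iff_ne.mpr hs
  simp [pvRank1, pvAliasList, List.lookup, pvIdxIn, e _ h1, e _ h2, e _ h3, e _ h4, e _ h5,
    e _ h6, e _ h7, e _ h8, e _ h9, e _ h10, e _ h11, e _ h12, e _ h13, e _ h14]

theorem pvRank2_eq (k : String) :
    pvRank2 k = pvIdxIn ["topic", "subject", "area", "field", "technology"] k := by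
  rcases eq_or_ne k "hobby" with rfl | h1; · decide
  rcases eq_or_ne k "hobby_type" with rfl | h2; · decide
  rcases eq_or_ne k "activity" with rfl | h3; · decide
  rcases eq_or_ne k "type" with rfl | h4; · decide
  rcases eq_or_ne k "item" with rfl | h5; · decide
  rcases eq_or_ne k "item_type" with rfl | h6; · decide
  rcases eq_or_ne k "object" with rfl | h7; · decide
  rcases eq_or_ne k "thing" with rfl | h8; · decide
  rcases eq_or_ne k "product" with rfl | h9; · decide
  rcases eq_or_ne k "topic" with rfl | h10; · decide
  rcases eq_or_ne k "subject" with rfl | h11; · decide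
  rcases eq_or_ne k "area" with rfl | h12; · decide
  rcases eq_or_ne k "field" with rfl | h13; · decide
  rcases eq_or_ne k "technology" with rfl | h14; · decide
  have e : ∀ s : String, k ≠ s → (k == s) = false := fun s hs => beq_eq_false_iff_ne.mpr hs
  simp [pvRank2, pvAliasList, List.lookup, pvIdxIn, e _ h1, e _ h2, e _ h3, e _ h4, e _ h5,
    e _ h6, e _ h7, e _ h8, e _ h9, e _ h10, e _ h11, e _ h12, e _ h13, e _ h14]

-- min-by-rank merge (left preference on ties); pvStepFor is a merge with a singleton
def pvMerge : Option (Nat × String) → Option (Nat × String) → Option (Nat × String)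
  | a, none => a
  | none, some e => some e
  | some (r0, v0), some (r, v) => if r < r0 then some (r, v) else some (r0, v0)

def pvEntry (rk : String → Option Nat) (kv : String × String) : Option (Nat × String) :=
  (rk kv.1).map (fun r => (r, kv.2))

def pvShift (p : Nat × String) : Nat × String := (p.1 + 1, p.2)

theorem pvStepFor_eq_merge (rk : String → Option Nat) (b : Option (Nat × String))
    (kv : String × String) : pvStepFor rk b kv = pvMerge b (pvEntry rk kv) := by
  simp only [pvStepFor, pvEntry]
  rcases rk kv.1 with _ | r
  · rfl
  · rcases b with _ | ⟨r0, v0⟩ <;> rfl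

theorem pvMerge_none_left (b : Option (Nat × String)) : pvMerge none b = b := by
  cases b <;> rfl

theorem pvMerge_some_some (r0 : Nat) (v0 : String) (r : Nat) (v : String) :
    pvMerge (some (r0, v0)) (some (r, v)) = if r < r0 then some (r, v) else some (r0, v0) := rfl

theorem pvMerge_assoc (a b c : Option (Nat × String)) :
    pvMerge (pvMerge a b) c = pvMerge a (pvMerge b c) := by
  rcases a with _ | ⟨ra, va⟩ <;> rcases b with _ | ⟨rb, vb⟩ <;> rcases c with _ | ⟨rc, vc⟩ <;>
    (try simp only [pvMerge_none_left]) <;> try rfl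
  rw [pvMerge_some_some, pvMerge_some_some]
  split_ifs with h1 h2 <;> (repeat rw [pvMerge_some_some]) <;> (try split_ifs) <;>
    first | rfl | (exfalso; omega)

theorem pvMerge_shift (a b : Option (Nat × String)) :
    pvMerge (a.map pvShift) (b.map pvShift) = (pvMerge a b).map pvShift := by
  rcases a with _ | ⟨ra, va⟩ <;> rcases b with _ | ⟨rb, vb⟩ <;>
    (try simp only [Option.map_none, Option.map_some, pvMerge_none_left]) <;> try rfl
  simp only [pvShift, pvMerge_some_some]
  by_cases h : rb < ra
  · rw [if_pos h, if_pos (by omega)]; rfl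
  · rw [if_neg h, if_neg (by omega)]; rfl

theorem pvMerge_zero_left (v : String) (b : Option (Nat × String)) :
    pvMerge (some (0, v)) (b.map pvShift) = some (0, v) := by
  rcases b with _ | ⟨rb, vb⟩
  · rfl
  · simp only [Option.map_some, pvShift, pvMerge]
    rw [if_neg (by omega)]

theorem pvMerge_zero_right (a : Option (Nat × String)) (v : String) :
    pvMerge (a.map pvShift) (some (0, v)) = some (0, v) := by
  rcases a with _ | ⟨ra, va⟩
  · rfl
  · simp only [Option.map_some, pvShift, pvMerge]
    rw [if_pos (by omega)]

def pvM (rk : String → Option Nat) (l : List (String × String)) : Option (Nat × String) :=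
  l.foldl (pvStepFor rk) none

theorem pvM_foldl (rk : String → Option Nat) (l : List (String × String))
    (b : Option (Nat × String)) : l.foldl (pvStepFor rk) b = pvMerge b (pvM rk l) := by
  induction l generalizing b with
  | nil => cases b <;> rfl
  | cons kv l ih =>
    have hR : pvM rk (kv :: l) = pvMerge (pvEntry rk kv) (pvM rk l) := by
      show List.foldl (pvStepFor rk) (pvStepFor rk none kv) l = _
      rw [ih, pvStepFor_eq_merge, pvMerge_none_left]
    rw [List.foldl_cons, ih, pvStepFor_eq_merge, hR, pvMerge_assoc]

theorem pvM_cons (rk : String → Option Nat) (kv : String × String)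
    (l : List (String × String)) :
    pvM rk (kv :: l) = pvMerge (pvEntry rk kv) (pvM rk l) := by
  show List.foldl (pvStepFor rk) (pvStepFor rk none kv) l = _
  rw [pvM_foldl, pvStepFor_eq_merge, pvMerge_none_left]

theorem pvLookup_cons (kv : String × String) (l : List (String × String)) (k : String) :
    pvLookup (kv :: l) k = if kv.1 == k then some kv.2 else pvLookup l k := by
  simp only [pvLookup, List.find?_cons]
  by_cases h : kv.1 == k <;> simp [h]

theorem pvLookup_eq_none_of_not_mem (l : List (String × String)) (k : String)
    (h : k ∉ l.map (·.1)) : pvLookup l k = none := by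
  simp only [pvLookup, Option.map_eq_none_iff, List.find?_eq_none]
  intro p hp hbeq
  exact h (List.mem_map.mpr ⟨p, hp, (beq_iff_eq.mp hbeq).symm ▸ rfl⟩)

-- peeling the head candidate off the rank function
theorem pvM_cons_ks (k0 : String) (ks : List String) (l : List (String × String))
    (h : (l.map (·.1)).Nodup) :
    pvM (pvIdxIn (k0 :: ks)) l =
      match pvLookup l k0 with
      | some v => some (0, v)
      | none => (pvM (pvIdxIn ks) l).map pvShift := by
  induction l with
  | nil => rfl
  | cons kv l ih =>
    simp only [List.map_cons, List.nodup_cons] at h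
    obtain ⟨hk, hnd⟩ := h
    rw [pvM_cons, pvM_cons, ih hnd, pvLookup_cons]
    by_cases hkk : kv.1 == k0
    · -- kv's key is k0: it has rank 0 and wins; k0 is absent from the tail
      have hk0 : k0 ∉ l.map (·.1) := beq_iff_eq.mp hkk ▸ hk
      rw [pvLookup_eq_none_of_not_mem l k0 hk0]
      have hent : pvEntry (pvIdxIn (k0 :: ks)) kv = some (0, kv.2) := by
        simp [pvEntry, pvIdxIn, hkk]
      rw [hent]
      simp only [hkk, if_pos]
      exact pvMerge_zero_left kv.2 _
    · -- kv's key differs from k0: its rank under (k0 :: ks) is its rank under ks shifted by 1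
      have hent : pvEntry (pvIdxIn (k0 :: ks)) kv = (pvEntry (pvIdxIn ks) kv).map pvShift := by
        simp only [pvEntry, pvIdxIn, hkk, if_false, Bool.false_eq_true]
        cases pvIdxIn ks kv.1 <;> rfl
      rw [hent]
      simp only [hkk, Bool.false_eq_true, if_false]
      cases hfind : pvLookup l k0 with
      | some v => exact pvMerge_zero_right _ v
      | none => exact pvMerge_shift _ _

theorem pvM_nil_ks (l : List (String × String)) : pvM (pvIdxIn []) l = none := by
  induction l with
  | nil => rfl
  | cons kv l ih => rw [pvM_cons, ih]; rfl

-- B's per-rule minimum over the items equals A's first-hit scan over the candidate list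
theorem pvM_eq_firstVal (ks : List String) (l : List (String × String))
    (h : (l.map (·.1)).Nodup) :
    (pvM (pvIdxIn ks) l).map (·.2) = pvFirstVal l ks := by
  induction ks with
  | nil => rw [pvM_nil_ks]; rfl
  | cons k0 ks ih =>
    rw [pvM_cons_ks k0 ks l h]
    simp only [pvFirstVal]
    cases pvLookup l k0 with
    | some v => rfl
    | none =>
      rw [← ih]
      cases pvM (pvIdxIn ks) l <;> rfl

theorem pvBest_eq (d : PySem.Dict String String) :
    d.items.foldl pvBestStep (none, none, none) =
      ((pvM (pvIdxIn ["hobby", "hobby_type", "activity", "type"]) d.items),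
       (pvM (pvIdxIn ["item", "item_type", "object", "thing", "product"]) d.items),
       (pvM (pvIdxIn ["topic", "subject", "area", "field", "technology"]) d.items)) := by
  rw [pvBestStep_split]
  rw [funext pvRank0_eq, funext pvRank1_eq, funext pvRank2_eq]
  rfl

-- ===== VERDICT (by name: the statement is the Claim_ definition above) =====
theorem parse_creative_action_spec : Claim_equal_parse_creative_action := by
  intro action_name parameters _
  unfold Spec_parse_creative_action parse_creative_action parse_creative_action_alt
  have hnd' : ((PySem.Dict.ofList parameters).items.map (·.1)).Nodup :=
    PySem.Dict.nodup_keys_ofList parameters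
  simp only [pvBest_eq, pvFindKeyA_eq_firstVal,
    ← pvM_eq_firstVal _ _ hnd']
  rcases pvM (pvIdxIn ["hobby", "hobby_type", "activity", "type"]) (PySem.Dict.ofList parameters).items with _ | ⟨r1, v1⟩ <;>
    rcases pvM (pvIdxIn ["item", "item_type", "object", "thing", "product"]) (PySem.Dict.ofList parameters).items with _ | ⟨r2, v2⟩ <;>
    rcases pvM (pvIdxIn ["topic", "subject", "area", "field", "technology"]) (PySem.Dict.ofList parameters).items with _ | ⟨r3, v3⟩ <;>
    simp only [Option.map_none, Option.map_some]
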